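-- pv_equiv track=rewrite | github.com/Way-Lab/ecoli_natural_immunity | peptide_analysis/generate_full_alignments.py | extract_species_from_header
-- ===== SOURCE A (Python) =====
-- def extract_species_from_header(header):
--     """Extract clean species/strain name from FASTA header."""
--     header_lower = header.lower()
--
--     # Check for specific E. coli strain identifiers
--     if 'scb' in header_lower:
--         # Extract SCB number
--         parts = header.split()
--         for part in parts:
--             if 'scb' in part.lower():
--                 return f"E_coli_{part.strip()}"
--
--     if 'nissle' in header_lower or 'ecn' in header_lower:
--         return 'E_coli_Nissle'
--     elif 'o157' in header_lower or 'sakai' in header_lower: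
--         return 'E_coli_O157H7'
--     elif 'ec958' in header_lower:
--         return 'E_coli_EC958'
--     elif 'uti189' in header_lower:
--         return 'E_coli_UTI189'
--     elif 'cft073' in header_lower:
--         return 'E_coli_CFT073'
--     elif 'dh5' in header_lower:
--         return 'E_coli_DH5alpha'
--     elif 'k-12' in header_lower or 'mg1655' in header_lower:
--         return 'E_coli_K12'
--     elif 'coli' in header_lower:
--         # Generic E. coli - use accession
--         acc = header.split()[0].split('|')[0]
--         return f"E_coli_{acc}"
--     elif 'klebsiella' in header_lower:
--         acc = header.split()[0].split('|')[0]
--         if 'pneumoniae' in header_lower: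
--             return f'Klebsiella_pneumoniae_{acc}'
--         elif 'oxytoca' in header_lower:
--             return f'Klebsiella_oxytoca_{acc}'
--         else:
--             return f'Klebsiella_{acc}'
--     elif 'enterobacter' in header_lower:
--         acc = header.split()[0].split('|')[0]
--         if 'cloacae' in header_lower:
--             return f'Enterobacter_cloacae_{acc}'
--         elif 'aerogenes' in header_lower:
--             return f'Enterobacter_aerogenes_{acc}'
--         else:
--             return f'Enterobacter_{acc}'
--     elif 'citrobacter' in header_lower:
--         acc = header.split()[0].split('|')[0]
--         if 'freundii' in header_lower:
--             return f'Citrobacter_freundii_{acc}'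
--         elif 'koseri' in header_lower:
--             return f'Citrobacter_koseri_{acc}'
--         else:
--             return f'Citrobacter_{acc}'
--     elif 'salmonella' in header_lower:
--         acc = header.split()[0].split('|')[0]
--         return f'Salmonella_{acc}'
--     elif 'shigella' in header_lower:
--         acc = header.split()[0].split('|')[0]
--         if 'flexneri' in header_lower:
--             return f'Shigella_flexneri_{acc}'
--         elif 'sonnei' in header_lower:
--             return f'Shigella_sonnei_{acc}'
--         else:
--             return f'Shigella_{acc}'
--     elif 'proteus' in header_lower:
--         acc = header.split()[0].split('|')[0]
--         return f'Proteus_mirabilis_{acc}'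
--     elif 'serratia' in header_lower:
--         acc = header.split()[0].split('|')[0]
--         return f'Serratia_marcescens_{acc}'
--     else:
--         # Use first accession/ID
--         return header.split()[0].split('|')[0][:30]
-- ===== SOURCE B (Python) =====
-- # B: instead of an early-return if/elif ladder, score the header once: collect the
-- # ranks of ALL matching trigger keywords, take the minimum rank, and dispatch on it
-- # through lookup tables (labels / genus formatting).
-- _TRIGGERS = [('nissle', 1), ('ecn', 1), ('o157', 2), ('sakai', 2), ('ec958', 3),
--              ('uti189', 4), ('cft073', 5), ('dh5', 6), ('k-12', 7), ('mg1655', 7),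
--              ('coli', 8), ('klebsiella', 9), ('enterobacter', 10), ('citrobacter', 11),
--              ('salmonella', 12), ('shigella', 13), ('proteus', 14), ('serratia', 15)]
--
-- _LABELS = {1: 'E_coli_Nissle', 2: 'E_coli_O157H7', 3: 'E_coli_EC958',
--            4: 'E_coli_UTI189', 5: 'E_coli_CFT073', 6: 'E_coli_DH5alpha',
--            7: 'E_coli_K12'}
--
-- _GENUS = {8: ('E_coli_', []),
--           9: ('Klebsiella_', [('pneumoniae', 'Klebsiella_pneumoniae_'),
--                               ('oxytoca', 'Klebsiella_oxytoca_')]),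
--           10: ('Enterobacter_', [('cloacae', 'Enterobacter_cloacae_'),
--                                  ('aerogenes', 'Enterobacter_aerogenes_')]),
--           11: ('Citrobacter_', [('freundii', 'Citrobacter_freundii_'),
--                                 ('koseri', 'Citrobacter_koseri_')]),
--           12: ('Salmonella_', []),
--           13: ('Shigella_', [('flexneri', 'Shigella_flexneri_'),
--                              ('sonnei', 'Shigella_sonnei_')]),
--           14: ('Proteus_mirabilis_', []),
--           15: ('Serratia_marcescens_', [])}
--
--
-- def extract_species_from_header(header):
--     """Extract clean species/strain name from FASTA header."""
--     hl = header.lower()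
--
--     if 'scb' in hl:
--         for part in header.split():
--             if 'scb' in part.lower():
--                 return f"E_coli_{part.strip()}"
--
--     ranks = [r for kw, r in _TRIGGERS if kw in hl]
--     if not ranks:
--         return header.split()[0].split('|')[0][:30]
--     best = min(ranks)
--     if best in _LABELS:
--         return _LABELS[best]
--     acc = header.split()[0].split('|')[0]
--     default, subs = _GENUS[best]
--     hits = [p for kw, p in subs if kw in hl]
--     return (hits[0] if hits else default) + acc
-- ===== Notes on version B (the rewrite author's own statement) =====
-- stated objective: alternative
-- what changed: Replaced A's early-return if/elif ladder with a scoring pass: B collects the ranks of ALL matching trigger keywords, takes the minimum rank (correct because ranks are nondecreasing in A's check order), and dispatches on it through label/genus lookup tables; Pre_ excludes whitespace-only headers, on which both programs raise IndexError.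
import Mathlib
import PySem

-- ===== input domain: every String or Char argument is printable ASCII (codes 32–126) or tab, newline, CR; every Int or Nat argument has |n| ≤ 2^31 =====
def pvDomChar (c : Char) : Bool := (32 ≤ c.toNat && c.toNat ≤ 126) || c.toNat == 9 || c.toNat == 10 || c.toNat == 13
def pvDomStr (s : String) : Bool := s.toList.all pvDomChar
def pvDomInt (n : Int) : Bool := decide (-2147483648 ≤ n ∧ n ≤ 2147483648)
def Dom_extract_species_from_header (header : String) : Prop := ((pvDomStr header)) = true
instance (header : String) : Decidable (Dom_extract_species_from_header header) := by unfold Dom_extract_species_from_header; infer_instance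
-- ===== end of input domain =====

-- B replaces A's early-return if/elif ladder by a scoring pass: collect the ranks of ALL
-- matching trigger keywords, take the minimum rank, dispatch on it through lookup tables
-- (alternative decomposition, same cost; return value only).
-- acc = header.split()[0].split('|')[0]; the [0] lookups are total here via getD "" — Pre_ excludes the only inputs (whitespace-only headers) where Python would raise.
def pvAcc (header : String) : String :=
  (PySem.List.pyGet? ((PySem.Str.split? ((PySem.List.pyGet? (PySem.Str.split₀ header) 0).getD "") "|").getD []) 0).getD ""

-- ===== PORT A =====
-- the if/elif ladder following the SCB special case, transliterated branch for branch
def pvLadderA (header hl : String) : String :=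
  if PySem.Str.isIn "nissle" hl || PySem.Str.isIn "ecn" hl then "E_coli_Nissle"
  else if PySem.Str.isIn "o157" hl || PySem.Str.isIn "sakai" hl then "E_coli_O157H7"
  else if PySem.Str.isIn "ec958" hl then "E_coli_EC958"
  else if PySem.Str.isIn "uti189" hl then "E_coli_UTI189"
  else if PySem.Str.isIn "cft073" hl then "E_coli_CFT073"
  else if PySem.Str.isIn "dh5" hl then "E_coli_DH5alpha"
  else if PySem.Str.isIn "k-12" hl || PySem.Str.isIn "mg1655" hl then "E_coli_K12"
  else if PySem.Str.isIn "coli" hl then "E_coli_" ++ pvAcc header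
  else if PySem.Str.isIn "klebsiella" hl then
    let acc := pvAcc header
    if PySem.Str.isIn "pneumoniae" hl then "Klebsiella_pneumoniae_" ++ acc
    else if PySem.Str.isIn "oxytoca" hl then "Klebsiella_oxytoca_" ++ acc
    else "Klebsiella_" ++ acc
  else if PySem.Str.isIn "enterobacter" hl then
    let acc := pvAcc header
    if PySem.Str.isIn "cloacae" hl then "Enterobacter_cloacae_" ++ acc
    else if PySem.Str.isIn "aerogenes" hl then "Enterobacter_aerogenes_" ++ acc
    else "Enterobacter_" ++ acc
  else if PySem.Str.isIn "citrobacter" hl then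
    let acc := pvAcc header
    if PySem.Str.isIn "freundii" hl then "Citrobacter_freundii_" ++ acc
    else if PySem.Str.isIn "koseri" hl then "Citrobacter_koseri_" ++ acc
    else "Citrobacter_" ++ acc
  else if PySem.Str.isIn "salmonella" hl then "Salmonella_" ++ pvAcc header
  else if PySem.Str.isIn "shigella" hl then
    let acc := pvAcc header
    if PySem.Str.isIn "flexneri" hl then "Shigella_flexneri_" ++ acc
    else if PySem.Str.isIn "sonnei" hl then "Shigella_sonnei_" ++ acc
    else "Shigella_" ++ acc
  else if PySem.Str.isIn "proteus" hl then "Proteus_mirabilis_" ++ pvAcc header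
  else if PySem.Str.isIn "serratia" hl then "Serratia_marcescens_" ++ pvAcc header
  else PySem.Str.slice (pvAcc header) none (some 30)

def extract_species_from_header (header : String) : String :=
  let hl := PySem.Str.lower header
  if PySem.Str.isIn "scb" hl then
    match (PySem.Str.split₀ header).find? (fun part => PySem.Str.isIn "scb" (PySem.Str.lower part)) with
    | some part => "E_coli_" ++ PySem.Str.strip part
    | none => pvLadderA header hl
  else pvLadderA header hl

-- ===== PORT B =====
def pvTriggersB : List (String × Int) :=
  [("nissle", 1), ("ecn", 1), ("o157", 2), ("sakai", 2), ("ec958", 3),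
   ("uti189", 4), ("cft073", 5), ("dh5", 6), ("k-12", 7), ("mg1655", 7),
   ("coli", 8), ("klebsiella", 9), ("enterobacter", 10), ("citrobacter", 11),
   ("salmonella", 12), ("shigella", 13), ("proteus", 14), ("serratia", 15)]

def pvLabelsB : PySem.Dict Int String := PySem.Dict.ofList
  [(1, "E_coli_Nissle"), (2, "E_coli_O157H7"), (3, "E_coli_EC958"),
   (4, "E_coli_UTI189"), (5, "E_coli_CFT073"), (6, "E_coli_DH5alpha"),
   (7, "E_coli_K12")]

def pvGenusB : PySem.Dict Int (String × List (String × String)) := PySem.Dict.ofList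
  [(8, ("E_coli_", [])),
   (9, ("Klebsiella_", [("pneumoniae", "Klebsiella_pneumoniae_"), ("oxytoca", "Klebsiella_oxytoca_")])),
   (10, ("Enterobacter_", [("cloacae", "Enterobacter_cloacae_"), ("aerogenes", "Enterobacter_aerogenes_")])),
   (11, ("Citrobacter_", [("freundii", "Citrobacter_freundii_"), ("koseri", "Citrobacter_koseri_")])),
   (12, ("Salmonella_", [])),
   (13, ("Shigella_", [("flexneri", "Shigella_flexneri_"), ("sonnei", "Shigella_sonnei_")])),
   (14, ("Proteus_mirabilis_", [])),
   (15, ("Serratia_marcescens_", []))]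

-- ranks = [r for kw, r in _TRIGGERS if kw in hl]; min(ranks); table dispatch on best
-- (_GENUS[best] never misses when reached — keys 8..15 cover every unlabelled rank — so its getD default is inert)
def pvScoreB (header hl : String) : String :=
  let ranks := (pvTriggersB.filter (fun p => PySem.Str.isIn p.1 hl)).map Prod.snd
  match PySem.List.min? ranks (fun y => y) with
  | none => PySem.Str.slice (pvAcc header) none (some 30)
  | some best =>
    if pvLabelsB.contains best then (pvLabelsB.get? best).getD ""
    else
      let acc := pvAcc header
      let gd := (pvGenusB.get? best).getD ("", [])
      let hits := (gd.2.filter (fun p => PySem.Str.isIn p.1 hl)).map Prod.snd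
      hits.headD gd.1 ++ acc

def extract_species_from_header_alt (header : String) : String :=
  let hl := PySem.Str.lower header
  if PySem.Str.isIn "scb" hl then
    match (PySem.Str.split₀ header).find? (fun part => PySem.Str.isIn "scb" (PySem.Str.lower part)) with
    | some part => "E_coli_" ++ PySem.Str.strip part
    | none => pvScoreB header hl
  else pvScoreB header hl

-- ===== PRECONDITION & SPEC =====
-- Pre_ excludes exactly the whitespace-only headers: there header.split() == [] and both programs raise IndexError.
def Pre_extract_species_from_header (header : String) : Prop :=
  PySem.Str.split₀ header ≠ []
instance (header : String) : Decidable (Pre_extract_species_from_header header) := by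
  unfold Pre_extract_species_from_header; infer_instance

def pvWitness_extract_species_from_header : String := "Klebsiella pneumoniae sp|P1|X"

def Spec_extract_species_from_header (header : String) (out : String) : Prop :=
  out = extract_species_from_header_alt header
instance (header : String) (out : String) : Decidable (Spec_extract_species_from_header header out) := by
  unfold Spec_extract_species_from_header; infer_instance

-- ===== CLAIM (what is proved, stated in full; the proofs are below) =====
def Claim_equal_extract_species_from_header : Prop := ∀ (header : String), Dom_extract_species_from_header header → Pre_extract_species_from_header header → Spec_extract_species_from_header header (extract_species_from_header header)

-- ===== LEMMAS AND PROOFS =====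

set_option maxHeartbeats 1000000

-- the first-match rank of the trigger list (proof-side characterisation of the ladder)
def pvFirstL (hl : String) : List (String × Int) → Option Int
  | [] => none
  | (kw, r) :: t => if PySem.Str.isIn kw hl then some r else pvFirstL hl t

-- the table-dispatch tail of pvScoreB, named so it can be evaluated per rank
def pvDispatch (header hl : String) : Option Int → String
  | none => PySem.Str.slice (pvAcc header) none (some 30)
  | some best =>
    if pvLabelsB.contains best then (pvLabelsB.get? best).getD ""
    else
      let acc := pvAcc header
      let gd := (pvGenusB.get? best).getD ("", [])
      let hits := (gd.2.filter (fun p => PySem.Str.isIn p.1 hl)).map Prod.snd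
      hits.headD gd.1 ++ acc

theorem scoreB_eq_dispatch (header hl : String) :
    pvScoreB header hl =
      pvDispatch header hl
        (PySem.List.min? ((pvTriggersB.filter (fun p => PySem.Str.isIn p.1 hl)).map Prod.snd)
          (fun y => y)) := rfl

theorem foldl_min_of_le {a : Int} {l : List Int} (h : ∀ x ∈ l, a ≤ x) :
    l.foldl min a = a := by
  induction l with
  | nil => rfl
  | cons x t ih =>
    have hx : min a x = a := min_eq_left (h x (by simp))
    simpa [hx] using ih (fun y hy => h y (by simp [hy]))

-- because ranks are nondecreasing along the trigger list, the minimum of all matched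
-- ranks is the rank of the first matched trigger
theorem min_filter_eq_first (hl : String) (l : List (String × Int))
    (hsort : l.Pairwise (fun a b => a.2 ≤ b.2)) :
    PySem.List.min? ((l.filter (fun p => PySem.Str.isIn p.1 hl)).map Prod.snd) (fun y => y)
      = pvFirstL hl l := by
  induction l with
  | nil => rfl
  | cons p t ih =>
    rcases List.pairwise_cons.mp hsort with ⟨hle, ht⟩
    by_cases hm : PySem.Str.isIn p.1 hl
    · have hall : ∀ x ∈ (t.filter (fun q => PySem.Str.isIn q.1 hl)).map Prod.snd, p.2 ≤ x := by
        intro x hx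
        rcases List.mem_map.mp hx with ⟨q, hq, rfl⟩
        exact hle q (List.mem_of_mem_filter hq)
      obtain ⟨kw, r⟩ := p
      simp only [List.filter_cons, hm, if_pos, List.map_cons, pvFirstL,
        PySem.List.min?_id_cons, foldl_min_of_le hall]
    · obtain ⟨kw, r⟩ := p
      rw [Bool.not_eq_true] at hm
      simp only [List.filter_cons, hm, Bool.false_eq_true, if_false, pvFirstL, ih ht]

-- per-rank evaluations of the dispatch (definitional)
theorem pvDispN (header hl : String) : pvDispatch header hl none = PySem.Str.slice (pvAcc header) none (some 30) := rfl
theorem pvDisp1 (header hl : String) : pvDispatch header hl (some 1) = "E_coli_Nissle" := rfl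
theorem pvDisp2 (header hl : String) : pvDispatch header hl (some 2) = "E_coli_O157H7" := rfl
theorem pvDisp3 (header hl : String) : pvDispatch header hl (some 3) = "E_coli_EC958" := rfl
theorem pvDisp4 (header hl : String) : pvDispatch header hl (some 4) = "E_coli_UTI189" := rfl
theorem pvDisp5 (header hl : String) : pvDispatch header hl (some 5) = "E_coli_CFT073" := rfl
theorem pvDisp6 (header hl : String) : pvDispatch header hl (some 6) = "E_coli_DH5alpha" := rfl
theorem pvDisp7 (header hl : String) : pvDispatch header hl (some 7) = "E_coli_K12" := rfl
theorem pvDisp8 (header hl : String) : pvDispatch header hl (some 8) = "E_coli_" ++ pvAcc header := rfl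
theorem pvDisp9 (header hl : String) : pvDispatch header hl (some 9) =
    ((([("pneumoniae", "Klebsiella_pneumoniae_"), ("oxytoca", "Klebsiella_oxytoca_")].filter
        (fun p => PySem.Str.isIn p.1 hl)).map Prod.snd).headD "Klebsiella_") ++ pvAcc header := rfl
theorem pvDisp10 (header hl : String) : pvDispatch header hl (some 10) =
    ((([("cloacae", "Enterobacter_cloacae_"), ("aerogenes", "Enterobacter_aerogenes_")].filter
        (fun p => PySem.Str.isIn p.1 hl)).map Prod.snd).headD "Enterobacter_") ++ pvAcc header := rfl
theorem pvDisp11 (header hl : String) : pvDispatch header hl (some 11) =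
    ((([("freundii", "Citrobacter_freundii_"), ("koseri", "Citrobacter_koseri_")].filter
        (fun p => PySem.Str.isIn p.1 hl)).map Prod.snd).headD "Citrobacter_") ++ pvAcc header := rfl
theorem pvDisp12 (header hl : String) : pvDispatch header hl (some 12) = "Salmonella_" ++ pvAcc header := rfl
theorem pvDisp13 (header hl : String) : pvDispatch header hl (some 13) =
    ((([("flexneri", "Shigella_flexneri_"), ("sonnei", "Shigella_sonnei_")].filter
        (fun p => PySem.Str.isIn p.1 hl)).map Prod.snd).headD "Shigella_") ++ pvAcc header := rfl
theorem pvDisp14 (header hl : String) : pvDispatch header hl (some 14) = "Proteus_mirabilis_" ++ pvAcc header := rfl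
theorem pvDisp15 (header hl : String) : pvDispatch header hl (some 15) = "Serratia_marcescens_" ++ pvAcc header := rfl

-- the ladder computes the table dispatch of the first-match rank
theorem ladder_eq_dispatch (header hl : String) :
    pvLadderA header hl = pvDispatch header hl (pvFirstL hl pvTriggersB) := by
  by_cases t1 : PySem.Str.isIn "nissle" hl
  · simp only [pvLadderA, pvTriggersB, pvFirstL, Bool.true_or, Bool.false_or, Bool.or_self, Bool.false_eq_true, if_true, if_false, List.filter_cons, List.filter_nil, List.map_cons, List.map_nil, List.headD_cons, List.headD_nil, t1, pvDisp1]
  rw [Bool.not_eq_true] at t1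
  by_cases t2 : PySem.Str.isIn "ecn" hl
  · simp only [pvLadderA, pvTriggersB, pvFirstL, Bool.true_or, Bool.false_or, Bool.or_self, Bool.false_eq_true, if_true, if_false, List.filter_cons, List.filter_nil, List.map_cons, List.map_nil, List.headD_cons, List.headD_nil, t1, t2, pvDisp1]
  rw [Bool.not_eq_true] at t2
  by_cases t3 : PySem.Str.isIn "o157" hl
  · simp only [pvLadderA, pvTriggersB, pvFirstL, Bool.true_or, Bool.false_or, Bool.or_self, Bool.false_eq_true, if_true, if_false, List.filter_cons, List.filter_nil, List.map_cons, List.map_nil, List.headD_cons, List.headD_nil, t1, t2, t3, pvDisp2]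
  rw [Bool.not_eq_true] at t3
  by_cases t4 : PySem.Str.isIn "sakai" hl
  · simp only [pvLadderA, pvTriggersB, pvFirstL, Bool.true_or, Bool.false_or, Bool.or_self, Bool.false_eq_true, if_true, if_false, List.filter_cons, List.filter_nil, List.map_cons, List.map_nil, List.headD_cons, List.headD_nil, t1, t2, t3, t4, pvDisp2]
  rw [Bool.not_eq_true] at t4
  by_cases t5 : PySem.Str.isIn "ec958" hl
  · simp only [pvLadderA, pvTriggersB, pvFirstL, Bool.true_or, Bool.false_or, Bool.or_self, Bool.false_eq_true, if_true, if_false, List.filter_cons, List.filter_nil, List.map_cons, List.map_nil, List.headD_cons, List.headD_nil, t1, t2, t3, t4, t5, pvDisp3]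
  rw [Bool.not_eq_true] at t5
  by_cases t6 : PySem.Str.isIn "uti189" hl
  · simp only [pvLadderA, pvTriggersB, pvFirstL, Bool.true_or, Bool.false_or, Bool.or_self, Bool.false_eq_true, if_true, if_false, List.filter_cons, List.filter_nil, List.map_cons, List.map_nil, List.headD_cons, List.headD_nil, t1, t2, t3, t4, t5, t6, pvDisp4]
  rw [Bool.not_eq_true] at t6
  by_cases t7 : PySem.Str.isIn "cft073" hl
  · simp only [pvLadderA, pvTriggersB, pvFirstL, Bool.true_or, Bool.false_or, Bool.or_self, Bool.false_eq_true, if_true, if_false, List.filter_cons, List.filter_nil, List.map_cons, List.map_nil, List.headD_cons, List.headD_nil, t1, t2, t3, t4, t5, t6, t7, pvDisp5]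
  rw [Bool.not_eq_true] at t7
  by_cases t8 : PySem.Str.isIn "dh5" hl
  · simp only [pvLadderA, pvTriggersB, pvFirstL, Bool.true_or, Bool.false_or, Bool.or_self, Bool.false_eq_true, if_true, if_false, List.filter_cons, List.filter_nil, List.map_cons, List.map_nil, List.headD_cons, List.headD_nil, t1, t2, t3, t4, t5, t6, t7, t8, pvDisp6]
  rw [Bool.not_eq_true] at t8
  by_cases t9 : PySem.Str.isIn "k-12" hl
  · simp only [pvLadderA, pvTriggersB, pvFirstL, Bool.true_or, Bool.false_or, Bool.or_self, Bool.false_eq_true, if_true, if_false, List.filter_cons, List.filter_nil, List.map_cons, List.map_nil, List.headD_cons, List.headD_nil, t1, t2, t3, t4, t5, t6, t7, t8, t9, pvDisp7]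
  rw [Bool.not_eq_true] at t9
  by_cases t10 : PySem.Str.isIn "mg1655" hl
  · simp only [pvLadderA, pvTriggersB, pvFirstL, Bool.true_or, Bool.false_or, Bool.or_self, Bool.false_eq_true, if_true, if_false, List.filter_cons, List.filter_nil, List.map_cons, List.map_nil, List.headD_cons, List.headD_nil, t1, t2, t3, t4, t5, t6, t7, t8, t9, t10, pvDisp7]
  rw [Bool.not_eq_true] at t10
  by_cases t11 : PySem.Str.isIn "coli" hl
  · simp only [pvLadderA, pvTriggersB, pvFirstL, Bool.true_or, Bool.false_or, Bool.or_self, Bool.false_eq_true, if_true, if_false, List.filter_cons, List.filter_nil, List.map_cons, List.map_nil, List.headD_cons, List.headD_nil, t1, t2, t3, t4, t5, t6, t7, t8, t9, t10, t11, pvDisp8]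
  rw [Bool.not_eq_true] at t11
  by_cases t12 : PySem.Str.isIn "klebsiella" hl
  · by_cases s1 : PySem.Str.isIn "pneumoniae" hl
    · simp only [pvLadderA, pvTriggersB, pvFirstL, Bool.true_or, Bool.false_or, Bool.or_self, Bool.false_eq_true, if_true, if_false, List.filter_cons, List.filter_nil, List.map_cons, List.map_nil, List.headD_cons, List.headD_nil, t1, t2, t3, t4, t5, t6, t7, t8, t9, t10, t11, t12, s1, pvDisp9]
    rw [Bool.not_eq_true] at s1
    by_cases s2 : PySem.Str.isIn "oxytoca" hl
    · simp only [pvLadderA, pvTriggersB, pvFirstL, Bool.true_or, Bool.false_or, Bool.or_self, Bool.false_eq_true, if_true, if_false, List.filter_cons, List.filter_nil, List.map_cons, List.map_nil, List.headD_cons, List.headD_nil, t1, t2, t3, t4, t5, t6, t7, t8, t9, t10, t11, t12, s1, s2, pvDisp9]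
    rw [Bool.not_eq_true] at s2
    simp only [pvLadderA, pvTriggersB, pvFirstL, Bool.true_or, Bool.false_or, Bool.or_self, Bool.false_eq_true, if_true, if_false, List.filter_cons, List.filter_nil, List.map_cons, List.map_nil, List.headD_cons, List.headD_nil, t1, t2, t3, t4, t5, t6, t7, t8, t9, t10, t11, t12, s1, s2, pvDisp9]
  rw [Bool.not_eq_true] at t12
  by_cases t13 : PySem.Str.isIn "enterobacter" hl
  · by_cases s1 : PySem.Str.isIn "cloacae" hl
    · simp only [pvLadderA, pvTriggersB, pvFirstL, Bool.true_or, Bool.false_or, Bool.or_self, Bool.false_eq_true, if_true, if_false, List.filter_cons, List.filter_nil, List.map_cons, List.map_nil, List.headD_cons, List.headD_nil, t1, t2, t3, t4, t5, t6, t7, t8, t9, t10, t11, t12, t13, s1, pvDisp10]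
    rw [Bool.not_eq_true] at s1
    by_cases s2 : PySem.Str.isIn "aerogenes" hl
    · simp only [pvLadderA, pvTriggersB, pvFirstL, Bool.true_or, Bool.false_or, Bool.or_self, Bool.false_eq_true, if_true, if_false, List.filter_cons, List.filter_nil, List.map_cons, List.map_nil, List.headD_cons, List.headD_nil, t1, t2, t3, t4, t5, t6, t7, t8, t9, t10, t11, t12, t13, s1, s2, pvDisp10]
    rw [Bool.not_eq_true] at s2
    simp only [pvLadderA, pvTriggersB, pvFirstL, Bool.true_or, Bool.false_or, Bool.or_self, Bool.false_eq_true, if_true, if_false, List.filter_cons, List.filter_nil, List.map_cons, List.map_nil, List.headD_cons, List.headD_nil, t1, t2, t3, t4, t5, t6, t7, t8, t9, t10, t11, t12, t13, s1, s2, pvDisp10]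
  rw [Bool.not_eq_true] at t13
  by_cases t14 : PySem.Str.isIn "citrobacter" hl
  · by_cases s1 : PySem.Str.isIn "freundii" hl
    · simp only [pvLadderA, pvTriggersB, pvFirstL, Bool.true_or, Bool.false_or, Bool.or_self, Bool.false_eq_true, if_true, if_false, List.filter_cons, List.filter_nil, List.map_cons, List.map_nil, List.headD_cons, List.headD_nil, t1, t2, t3, t4, t5, t6, t7, t8, t9, t10, t11, t12, t13, t14, s1, pvDisp11]
    rw [Bool.not_eq_true] at s1
    by_cases s2 : PySem.Str.isIn "koseri" hl
    · simp only [pvLadderA, pvTriggersB, pvFirstL, Bool.true_or, Bool.false_or, Bool.or_self, Bool.false_eq_true, if_true, if_false, List.filter_cons, List.filter_nil, List.map_cons, List.map_nil, List.headD_cons, List.headD_nil, t1, t2, t3, t4, t5, t6, t7, t8, t9, t10, t11, t12, t13, t14, s1, s2, pvDisp11]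
    rw [Bool.not_eq_true] at s2
    simp only [pvLadderA, pvTriggersB, pvFirstL, Bool.true_or, Bool.false_or, Bool.or_self, Bool.false_eq_true, if_true, if_false, List.filter_cons, List.filter_nil, List.map_cons, List.map_nil, List.headD_cons, List.headD_nil, t1, t2, t3, t4, t5, t6, t7, t8, t9, t10, t11, t12, t13, t14, s1, s2, pvDisp11]
  rw [Bool.not_eq_true] at t14
  by_cases t15 : PySem.Str.isIn "salmonella" hl
  · simp only [pvLadderA, pvTriggersB, pvFirstL, Bool.true_or, Bool.false_or, Bool.or_self, Bool.false_eq_true, if_true, if_false, List.filter_cons, List.filter_nil, List.map_cons, List.map_nil, List.headD_cons, List.headD_nil, t1, t2, t3, t4, t5, t6, t7, t8, t9, t10, t11, t12, t13, t14, t15, pvDisp12]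
  rw [Bool.not_eq_true] at t15
  by_cases t16 : PySem.Str.isIn "shigella" hl
  · by_cases s1 : PySem.Str.isIn "flexneri" hl
    · simp only [pvLadderA, pvTriggersB, pvFirstL, Bool.true_or, Bool.false_or, Bool.or_self, Bool.false_eq_true, if_true, if_false, List.filter_cons, List.filter_nil, List.map_cons, List.map_nil, List.headD_cons, List.headD_nil, t1, t2, t3, t4, t5, t6, t7, t8, t9, t10, t11, t12, t13, t14, t15, t16, s1, pvDisp13]
    rw [Bool.not_eq_true] at s1
    by_cases s2 : PySem.Str.isIn "sonnei" hl
    · simp only [pvLadderA, pvTriggersB, pvFirstL, Bool.true_or, Bool.false_or, Bool.or_self, Bool.false_eq_true, if_true, if_false, List.filter_cons, List.filter_nil, List.map_cons, List.map_nil, List.headD_cons, List.headD_nil, t1, t2, t3, t4, t5, t6, t7, t8, t9, t10, t11, t12, t13, t14, t15, t16, s1, s2, pvDisp13]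
    rw [Bool.not_eq_true] at s2
    simp only [pvLadderA, pvTriggersB, pvFirstL, Bool.true_or, Bool.false_or, Bool.or_self, Bool.false_eq_true, if_true, if_false, List.filter_cons, List.filter_nil, List.map_cons, List.map_nil, List.headD_cons, List.headD_nil, t1, t2, t3, t4, t5, t6, t7, t8, t9, t10, t11, t12, t13, t14, t15, t16, s1, s2, pvDisp13]
  rw [Bool.not_eq_true] at t16
  by_cases t17 : PySem.Str.isIn "proteus" hl
  · simp only [pvLadderA, pvTriggersB, pvFirstL, Bool.true_or, Bool.false_or, Bool.or_self, Bool.false_eq_true, if_true, if_false, List.filter_cons, List.filter_nil, List.map_cons, List.map_nil, List.headD_cons, List.headD_nil, t1, t2, t3, t4, t5, t6, t7, t8, t9, t10, t11, t12, t13, t14, t15, t16, t17, pvDisp14]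
  rw [Bool.not_eq_true] at t17
  by_cases t18 : PySem.Str.isIn "serratia" hl
  · simp only [pvLadderA, pvTriggersB, pvFirstL, Bool.true_or, Bool.false_or, Bool.or_self, Bool.false_eq_true, if_true, if_false, List.filter_cons, List.filter_nil, List.map_cons, List.map_nil, List.headD_cons, List.headD_nil, t1, t2, t3, t4, t5, t6, t7, t8, t9, t10, t11, t12, t13, t14, t15, t16, t17, t18, pvDisp15]
  rw [Bool.not_eq_true] at t18
  simp only [pvLadderA, pvTriggersB, pvFirstL, Bool.true_or, Bool.false_or, Bool.or_self, Bool.false_eq_true, if_true, if_false, List.filter_cons, List.filter_nil, List.map_cons, List.map_nil, List.headD_cons, List.headD_nil, t1, t2, t3, t4, t5, t6, t7, t8, t9, t10, t11, t12, t13, t14, t15, t16, t17, t18, pvDispN]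

theorem pvTriggersB_sorted : pvTriggersB.Pairwise (fun a b => a.2 ≤ b.2) := by decide

theorem score_eq_ladder (header hl : String) : pvScoreB header hl = pvLadderA header hl := by
  rw [scoreB_eq_dispatch, ladder_eq_dispatch,
    min_filter_eq_first hl pvTriggersB pvTriggersB_sorted]

-- ===== VERDICT (by name: the statement is the Claim_ definition above) =====
theorem extract_species_from_header_spec : Claim_equal_extract_species_from_header := by
  intro header _ _
  unfold Spec_extract_species_from_header
  unfold extract_species_from_header extract_species_from_header_alt
  simp only [score_eq_ladder]
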